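-- pv_equiv track=rewrite | github.com/PyJobShop/FJSPLIB | fjsplib/read.py | parse_job_line
-- ===== SOURCE A (Python) =====
-- ProcessingData = list[tuple[int, int]]
--
-- def parse_job_line(line: list[int]) -> list[ProcessingData]:
--     """
--     Parses a FJSPLIB job data line of the following form:
--
--         <num operations> * (<num machines> * (<machine> <processing time>))
--
--     In words, the first value is the number of operations. Then, for each
--     operation, the first number represents the number of machines that can
--     process the operation, followed by, the machine index and processing time
--     for each eligible machine.
--
--     Note that the machine indices start from 1, so we subtract 1 to make them
--     zero-based.
--     """
--     num_operations = line[0]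
--     operations = []
--     idx = 1
--
--     for _ in range(num_operations):
--         num_pairs = int(line[idx]) * 2
--         machines = line[idx + 1 : idx + 1 + num_pairs : 2]
--         durations = line[idx + 2 : idx + 2 + num_pairs : 2]
--         operations.append([(m - 1, d) for m, d in zip(machines, durations)])
--
--         idx += 1 + num_pairs
--
--     return operations
-- ===== SOURCE B (Python) =====
-- def parse_job_line(line):
--     it = iter(line)
--     num_operations = next(it)
--     operations = []
--     for _ in range(num_operations):
--         num_machines = int(next(it))
--         operation = []
--         for _ in range(num_machines):
--             machine = next(it)
--             duration = next(it)
--             operation.append((machine - 1, duration))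
--         operations.append(operation)
--     return operations
-- ===== Notes on version B (the rewrite author's own statement) =====
-- stated objective: idiomatic
-- what changed: Replaced index arithmetic with strided slices and zip by sequential consumption of an iterator with nested explicit loops (one next() per token).
-- outside the precondition, e.g. on parse_job_line([1, 2, 3, 4, 5]): A returns [[(2, 4)]], B raises StopIteration; on parse_job_line([2, -1, 5, 1, 2, 3]): A returns [[], [(-2, 5), (0, 2)]], B raises StopIteration
import Mathlib
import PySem

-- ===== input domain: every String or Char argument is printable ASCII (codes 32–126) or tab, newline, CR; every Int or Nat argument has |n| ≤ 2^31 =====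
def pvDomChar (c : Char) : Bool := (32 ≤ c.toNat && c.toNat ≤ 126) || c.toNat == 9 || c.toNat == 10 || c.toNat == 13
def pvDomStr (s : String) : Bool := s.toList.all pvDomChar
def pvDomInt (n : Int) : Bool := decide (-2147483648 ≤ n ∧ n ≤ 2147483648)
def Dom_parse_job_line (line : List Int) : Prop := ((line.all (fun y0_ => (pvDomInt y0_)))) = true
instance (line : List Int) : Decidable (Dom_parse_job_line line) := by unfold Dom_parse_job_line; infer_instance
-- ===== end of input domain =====

-- B rewrites A's strided-slice index arithmetic as sequential consumption of a token cursor
-- with nested explicit loops (more idiomatic); equal return values on Pre_ (well-formed lines).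

-- ===== PORT A =====
-- loop body of A's `for _ in range(num_operations)` (state = (operations, idx))
def stepA (line : List Int) (st : List (List (Int × Int)) × Int) :
    List (List (Int × Int)) × Int :=
  match PySem.List.pyGet? line st.2 with
  | none => st  -- line[idx] raises IndexError in Python; excluded by Pre_
  | some v =>
    let num_pairs : Int := v * 2
    let machines := (PySem.List.slice? line (some (st.2 + 1)) (some (st.2 + 1 + num_pairs)) 2).getD []
    let durations := (PySem.List.slice? line (some (st.2 + 2)) (some (st.2 + 2 + num_pairs)) 2).getD []
    (st.1 ++ [(machines.zip durations).map (fun md => (md.1 - 1, md.2))],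
     st.2 + 1 + num_pairs)

def parse_job_line (line : List Int) : List (List (Int × Int)) :=
  match PySem.List.pyGet? line 0 with
  | none => []  -- line[0] raises IndexError in Python; excluded by Pre_
  | some num_operations =>
    ((PySem.List.pyRange 0 num_operations 1).foldl
      (fun st _ => stepA line st) ([], 1)).1

-- ===== PORT B =====
-- inner loop `for _ in range(num_machines)`: consume (machine, duration) pairs from the cursor
def altPairs : Nat → List Int → List (Int × Int) × List Int
  | 0, rest => ([], rest)
  | n+1, machine :: duration :: rest =>
    let r := altPairs n rest
    ((machine - 1, duration) :: r.1, r.2)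
  | _+1, rest => ([], rest)  -- next(it) raises StopIteration in Python; excluded by Pre_

-- outer loop `for _ in range(num_operations)`
def altOps : Nat → List Int → List (List (Int × Int))
  | 0, _ => []
  | n+1, k :: rest =>
    let p := altPairs k.toNat rest
    p.1 :: altOps n p.2
  | _+1, [] => []  -- next(it) raises StopIteration in Python; excluded by Pre_

def parse_job_line_alt (line : List Int) : List (List (Int × Int)) :=
  match line with
  | [] => []  -- num_operations = next(it) raises StopIteration in Python; excluded by Pre_
  | n :: rest => altOps n.toNat rest

-- ===== PRECONDITION & SPEC =====
-- structural well-formedness of the token list: each of the `c` blocks starts with a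
-- nonnegative machine count followed by that many (machine, duration) pairs
def blocksOK : Nat → List Int → Bool
  | 0, _ => true
  | _+1, [] => false
  | n+1, k :: rest =>
    decide (0 ≤ k) && decide (2 * k.toNat ≤ rest.length) && blocksOK n (rest.drop (2 * k.toNat))

-- Pre_ excludes the empty line (A raises IndexError) and malformed lines (a negative
-- machine count or too few tokens for the declared counts), on which A's slice-clamping
-- and index-rewind behaviour is accidental and B's sequential consumption raises or differs.
def Pre_parse_job_line (line : List Int) : Prop :=
  line ≠ [] ∧ blocksOK (line.headD 0).toNat line.tail = true
instance (line : List Int) : Decidable (Pre_parse_job_line line) := by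
  unfold Pre_parse_job_line; infer_instance

def pvWitness_parse_job_line : List Int := [2, 1, 1, 5, 2, 2, 3, 3, 4]

def Spec_parse_job_line (line : List Int) (out : List (List (Int × Int))) : Prop :=
  out = parse_job_line_alt line
instance (line : List Int) (out : List (List (Int × Int))) : Decidable (Spec_parse_job_line line out) := by
  unfold Spec_parse_job_line; infer_instance

-- ===== CLAIM (what is proved, stated in full; the proofs are below) =====
def Claim_equal_parse_job_line : Prop :=
  ∀ (line : List Int), Dom_parse_job_line line → Pre_parse_job_line line →
    Spec_parse_job_line line (parse_job_line line)

-- ===== LEMMAS AND PROOFS =====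

lemma getD_drop (l : List Int) (i j : Nat) (d : Int) :
    (l.drop i).getD j d = l.getD (i + j) d := by
  simp [List.getD_eq_getElem?_getD, List.getElem?_drop]

lemma filterMap_eq_map_of {α β : Type} (f : α → Option β) (g : α → β) (l : List α)
    (h : ∀ a ∈ l, f a = some (g a)) : l.filterMap f = l.map g := by
  induction l with
  | nil => simp
  | cons x xs ih =>
    simp [h x (by simp), ih (fun a ha => h a (by simp [ha]))]

lemma slice2_eq (xs : List Int) (a : Int) (n : Nat) (h0 : 0 ≤ a)
    (h : a.toNat + 2 * n ≤ xs.length + 1) :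
    (PySem.List.slice? xs (some a) (some (a + 2 * n)) 2).getD []
      = (List.range n).map (fun k => xs.getD (a.toNat + 2 * k) 0) := by
  simp only [PySem.List.slice?, PySem.List.sliceIndices]
  norm_num
  rw [if_neg (show ¬ a < 0 by omega), if_neg (show ¬ a + 2 * (n : Int) < 0 by omega)]
  rcases Nat.eq_zero_or_pos n with hn | hn
  · subst hn
    simp
  · have hal : a < (xs.length : Int) := by omega
    rw [min_eq_left (by omega)]
    have hcnt : (if a < min (a + 2 * (n:Int)) ↑xs.length then
        ((min (a + 2 * (n:Int)) ↑xs.length - a + 2 - 1) / 2).toNat else 0) = n := by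
      rw [if_pos (by omega)]
      omega
    rw [hcnt]
    apply filterMap_eq_map_of
    intro k hk
    simp only [List.mem_range] at hk
    have hidx : (a + 2 * (k:Int)).toNat = a.toNat + 2 * k := by omega
    have hlt : a.toNat + 2 * k < xs.length := by omega
    rw [hidx, List.getElem?_eq_getElem hlt]
    simp

lemma altPairs_eq (n : Nat) (rest : List Int) (h : 2 * n ≤ rest.length) :
    altPairs n rest
      = ((List.range n).map (fun k => (rest.getD (2 * k) 0 - 1, rest.getD (2 * k + 1) 0)),
         rest.drop (2 * n)) := by
  induction n generalizing rest with
  | zero => simp [altPairs]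
  | succ m ih =>
    match rest with
    | [] => simp at h
    | [x] => simp at h; omega
    | m1 :: d :: r =>
      have hr : 2 * m ≤ r.length := by simp at h; omega
      simp only [altPairs, ih r hr, List.range_succ_eq_map, List.map_cons, List.map_map,
        Prod.mk.injEq]
      refine ⟨?_, ?_⟩
      · refine List.cons_eq_cons.mpr ⟨by simp [List.getD], ?_⟩
        apply List.map_congr_left
        intro k _
        simp only [Function.comp]
        have e1 : 2 * (k+1) = 2*k+1+1 := by omega
        simp [e1, List.getD]
      · show r.drop (2*m) = (m1 :: d :: r).drop (2*(m+1))
        have : 2*(m+1) = 2*m + 1 + 1 := by omega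
        simp [this, List.drop_succ_cons]

lemma loopA (c : Nat) (l : List Int) (line : List Int) (idx : Nat)
    (ops : List (List (Int × Int))) (hl : l.length = c)
    (hb : blocksOK c (line.drop idx) = true) :
    (l.foldl (fun st _ => stepA line st) (ops, (idx : Int))).1
      = ops ++ altOps c (line.drop idx) := by
  induction c generalizing l idx ops with
  | zero =>
    rw [List.length_eq_zero_iff] at hl
    subst hl
    simp [altOps]
  | succ c ih =>
    match l, hl with
    | x :: l', hl =>
    cases hdrop : line.drop idx with
    | nil => rw [hdrop] at hb; simp [blocksOK] at hb
    | cons k rest =>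
      rw [hdrop] at hb
      simp only [blocksOK, Bool.and_eq_true, decide_eq_true_eq] at hb
      obtain ⟨⟨hk0, hklen⟩, hbrec⟩ := hb
      have hlen2 := congrArg List.length hdrop
      simp only [List.length_drop, List.length_cons] at hlen2
      have hidx : idx < line.length := by omega
      have hlen : line.length = idx + 1 + rest.length := by omega
      have hrest : line.drop (idx + 1) = rest := by
        rw [← List.tail_drop, hdrop]
        rfl
      have hget : PySem.List.pyGet? line (idx : Int) = some k := by
        rw [PySem.List.pyGet?_natCast, ← List.head?_drop, hdrop]
        rfl
      -- compute one stepA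
      have hstep : stepA line (ops, (idx : Int)) =
          (ops ++ [(List.range k.toNat).map
              (fun j => (line.getD (idx + 1 + 2 * j) 0 - 1, line.getD (idx + 2 + 2 * j) 0))],
           ((idx + 1 + 2 * k.toNat : Nat) : Int)) := by
        simp only [stepA, hget]
        have em : ((idx : Int) + 1 + k * 2) = ((idx + 1 : Nat) : Int) + 2 * (k.toNat : Int) := by
          push_cast; omega
        have ed : ((idx : Int) + 2 + k * 2) = ((idx + 2 : Nat) : Int) + 2 * (k.toNat : Int) := by
          push_cast; omega
        have e1 : ((idx : Int) + 1) = ((idx + 1 : Nat) : Int) := by push_cast; ring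
        have e2 : ((idx : Int) + 2) = ((idx + 2 : Nat) : Int) := by push_cast; ring
        rw [em, ed, e1, e2,
          slice2_eq line _ k.toNat (by positivity) (by simp; omega),
          slice2_eq line _ k.toNat (by positivity) (by simp; omega)]
        simp only [Int.toNat_natCast, List.zip_map', List.map_map]
        constructor
      have hb' : blocksOK c (line.drop (idx + 1 + 2 * k.toNat)) = true := by
        rw [← hrest, List.drop_drop] at hbrec
        exact hbrec
      rw [List.foldl_cons, hstep, ih l' (idx + 1 + 2 * k.toNat) _ (by simpa using hl) hb']
      simp only [altOps, altPairs_eq k.toNat rest hklen]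
      rw [← hrest, List.drop_drop]
      rw [List.append_assoc, List.singleton_append]
      congr 1
      congr 1
      apply List.map_congr_left
      intro j hj
      rw [getD_drop, getD_drop]
      have f2 : idx + 1 + (2 * j + 1) = idx + 2 + 2 * j := by omega
      rw [f2]

-- ===== VERDICT (by name: the statement is the Claim_ definition above) =====
theorem parse_job_line_spec : Claim_equal_parse_job_line := by
  intro line _ hpre
  obtain ⟨hne, hbl⟩ := hpre
  match line, hne with
  | n :: rest, _ =>
    unfold Spec_parse_job_line parse_job_line parse_job_line_alt
    have hget : PySem.List.pyGet? (n :: rest) 0 = some n := by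
      rw [show (0 : Int) = ((0 : Nat) : Int) from rfl, PySem.List.pyGet?_natCast]
      rfl
    rw [hget]
    have hbl' : blocksOK n.toNat ((n :: rest).drop 1) = true := by simpa using hbl
    show (List.foldl (fun st _ => stepA (n :: rest) st)
        ([], ((1 : Nat) : Int)) (PySem.List.pyRange 0 n 1)).1 = altOps n.toNat rest
    rw [loopA n.toNat (PySem.List.pyRange 0 n 1) (n :: rest) 1 []
      (by rw [PySem.List.length_pyRange_one]; simp) hbl']
    simp
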